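-- pv_equiv track=rewrite | github.com/betoayza/password-generator | main.py | format_new_password
-- ===== SOURCE A (Python) =====
-- def format_new_password(password):
--     new_password = ""
--     list_chars = []
--
--     # Extract chars
--     i = 0
--     while i < len(password):
--         if password[i].isalpha():
--             if len(list_chars) > 0 and list_chars[-1].islower():
--                 list_chars.append(password[i].upper())
--             else:
--                 list_chars.append(password[i])
--         i += 1
--
--     # Update password
--     j = 0
--     for i in range(0, len(password)):
--         if password[i].isalpha():
--             while j < len(list_chars):
--                 new_char = list_chars[j]
--                 new_password += new_char
--                 j += 1
--                 break
--         else: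
--             new_password += password[i]
--     return new_password
-- ===== SOURCE B (Python) =====
-- def format_new_password(password):
--     out = []
--     prev = None  # last emitted alphabetic char
--     for ch in password:
--         if ch.isalpha():
--             if prev is not None and prev.islower():
--                 ch = ch.upper()
--             out.append(ch)
--             prev = ch
--         else:
--             out.append(ch)
--     return "".join(out)
-- ===== Notes on version B (the rewrite author's own statement) =====
-- stated objective: simpler
-- what changed: Single pass that tracks only the last emitted letter, replacing A's two-phase build of an intermediate letter list plus a re-interleaving scan with an inner while/break.
import Mathlib
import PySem

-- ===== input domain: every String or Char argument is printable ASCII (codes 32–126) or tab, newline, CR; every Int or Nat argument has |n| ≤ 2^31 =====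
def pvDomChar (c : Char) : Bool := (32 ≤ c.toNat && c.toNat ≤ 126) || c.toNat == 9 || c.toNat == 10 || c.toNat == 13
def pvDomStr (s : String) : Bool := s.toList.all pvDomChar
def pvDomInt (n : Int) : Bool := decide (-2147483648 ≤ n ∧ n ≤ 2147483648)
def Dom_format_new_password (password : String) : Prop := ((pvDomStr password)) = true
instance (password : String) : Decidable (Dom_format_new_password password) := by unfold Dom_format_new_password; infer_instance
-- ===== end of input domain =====

-- B replaces A's two passes (build a letter list, then re-interleave it with an inner while/break)
-- by one pass that tracks only the last emitted letter; equal return value, no speed claim.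

-- ===== PORT A =====
-- first while loop: scan password, collect (possibly uppercased) letters in list_chars (append at end)
def fnp_extract : List Char → List Char → List Char
  | [], acc => acc
  | c :: cs, acc =>
      if PySem.Chars.isalpha c then
        -- 'len(list_chars) > 0 and list_chars[-1].islower()'
        if decide (0 < acc.length) && acc.getLast?.elim false PySem.Chars.islower then
          fnp_extract cs (acc ++ [PySem.Chars.upperChar c])
        else
          fnp_extract cs (acc ++ [c])
      else fnp_extract cs acc

-- second loop: rebuild new_password; the 'while j < len(list_chars): …; break' takes the next
-- pending letter if any (new_password is a string built by '+=' of single chars: carried as List Char)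
def fnp_update : List Char → List Char → List Char → List Char
  | [], _, np => np
  | c :: cs, pend, np =>
      if PySem.Chars.isalpha c then
        match pend with
        | nc :: rest => fnp_update cs rest (np ++ [nc])
        | [] => fnp_update cs [] np
      else fnp_update cs pend (np ++ [c])

def format_new_password (password : String) : String :=
  String.mk (fnp_update password.toList (fnp_extract password.toList []) [])

-- ===== PORT B =====
-- single pass: prev = last emitted letter (None before any letter); out = list of emitted chars
def fnp_alt_go : List Char → Option Char → List Char → List Char
  | [], _, out => out
  | ch :: cs, prev, out =>
      if PySem.Chars.isalpha ch then
        let ch' := if prev.elim false PySem.Chars.islower then PySem.Chars.upperChar ch else ch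
        fnp_alt_go cs (some ch') (out ++ [ch'])
      else fnp_alt_go cs prev (out ++ [ch])

def format_new_password_alt (password : String) : String :=
  String.mk (fnp_alt_go password.toList none [])

-- ===== PRECONDITION & SPEC =====
def Spec_format_new_password (password : String) (out : String) : Prop := out = format_new_password_alt password
instance (password : String) (out : String) : Decidable (Spec_format_new_password password out) := by unfold Spec_format_new_password; infer_instance

-- ===== CLAIM (what is proved, stated in full; the proofs are below) =====
def Claim_equal_format_new_password : Prop := ∀ (password : String), Dom_format_new_password password → Spec_format_new_password password (format_new_password password)

-- ===== LEMMAS AND PROOFS =====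

-- state-passing reformulation of A's first loop: state = last collected letter
def fnp_extract2 : List Char → Option Char → List Char
  | [], _ => []
  | c :: cs, st =>
      if PySem.Chars.isalpha c then
        let c' := if st.elim false PySem.Chars.islower then PySem.Chars.upperChar c else c
        c' :: fnp_extract2 cs (some c')
      else fnp_extract2 cs st

theorem fnp_extract_eq (cs : List Char) : ∀ acc : List Char,
    fnp_extract cs acc = acc ++ fnp_extract2 cs acc.getLast? := by
  induction cs with
  | nil => intro acc; simp [fnp_extract, fnp_extract2]
  | cons c cs ih =>
    intro acc
    by_cases h : PySem.Chars.isalpha c = true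
    · have hcond : (decide (0 < acc.length) && acc.getLast?.elim false PySem.Chars.islower)
          = acc.getLast?.elim false PySem.Chars.islower := by
        cases acc using List.reverseRecOn <;> simp
      simp only [fnp_extract, fnp_extract2, h, if_true, hcond]
      by_cases hl : acc.getLast?.elim false PySem.Chars.islower = true
      · simp [hl, ih, List.getLast?_concat]
      · simp [hl, ih, List.getLast?_concat]
    · simp [fnp_extract, fnp_extract2, h, ih]

theorem fnp_update_eq (cs : List Char) : ∀ (st : Option Char) (np : List Char),
    fnp_update cs (fnp_extract2 cs st) np = fnp_alt_go cs st np := by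
  induction cs with
  | nil => intro st np; simp [fnp_update, fnp_alt_go, fnp_extract2]
  | cons c cs ih =>
    intro st np
    by_cases h : PySem.Chars.isalpha c = true
    · simp only [fnp_extract2, fnp_update, fnp_alt_go, h, if_true]
      exact ih _ _
    · simp only [fnp_extract2, fnp_update, fnp_alt_go, h]
      simp [ih]

-- ===== VERDICT (by name: the statement is the Claim_ definition above) =====
theorem format_new_password_spec : Claim_equal_format_new_password := by
  intro password _
  unfold Spec_format_new_password format_new_password format_new_password_alt
  rw [fnp_extract_eq]
  simp only [List.getLast?_nil, List.nil_append]
  rw [fnp_update_eq]
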